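-- pv_equiv track=rewrite | github.com/SudhanshuDhanik/MY-CODING | PYTHON/college/QuestionBank/unit3/Q23.py | smallestSubarraySumK
-- ===== SOURCE A (Python) =====
-- def smallestSubarraySumK(arr,  k):
--     result = 2147483647
--
--     for i in range(0, len(arr)):
--         ans = 0
--         for j in range(i, len(arr)):
--             ans += arr[j]
--             if (ans == k):
--                 result = min(result, (j - i + 1))
--
--     # Return result
--     return result
-- ===== SOURCE B (Python) =====
-- def smallestSubarraySumK(arr, k):
--     result = 2147483647
--     last = {0: 0}          # prefix-sum value -> most recent prefix index
--     p = 0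
--     for j, x in enumerate(arr):
--         p += x
--         if p - k in last:
--             result = min(result, j + 1 - last[p - k])
--         last[p] = j + 1
--     return result
-- ===== Notes on version B (the rewrite author's own statement) =====
-- stated objective: faster
-- what changed: Replaced the O(n^2) double loop over all subarrays by a single pass keeping a running prefix sum and a hash map from prefix-sum value to its most recent index, so each position's best window is found by one dictionary lookup.
import Mathlib
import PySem

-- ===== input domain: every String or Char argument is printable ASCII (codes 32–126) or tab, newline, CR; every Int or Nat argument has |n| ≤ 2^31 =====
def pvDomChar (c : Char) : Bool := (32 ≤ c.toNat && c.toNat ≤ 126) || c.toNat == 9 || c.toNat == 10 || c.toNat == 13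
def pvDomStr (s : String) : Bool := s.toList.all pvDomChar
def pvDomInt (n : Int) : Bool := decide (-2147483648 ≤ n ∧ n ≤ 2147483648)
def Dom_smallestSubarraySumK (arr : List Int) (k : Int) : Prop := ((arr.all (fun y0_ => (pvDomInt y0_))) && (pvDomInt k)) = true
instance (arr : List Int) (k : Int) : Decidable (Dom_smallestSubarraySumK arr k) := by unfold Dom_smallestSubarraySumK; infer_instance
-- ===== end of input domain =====

-- B replaces A's O(n^2) double loop by one pass with a running prefix sum and a
-- dictionary mapping each prefix-sum value to its most recent index (objective: faster).

-- ===== PORT A =====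
def smallestSubarraySumK (arr : List Int) (k : Int) : Int :=
  (PySem.List.pyRange 0 arr.length 1).foldl
    (fun result i =>
      ((PySem.List.pyRange i arr.length 1).foldl
        (fun (st : Int × Int) j =>
          let ans := st.2 + PySem.List.pyGetD arr j 0
          (if ans = k then min st.1 (j - i + 1) else st.1, ans))
        (result, 0)).1)
    2147483647

-- ===== PORT B =====
def smallestSubarraySumK_alt (arr : List Int) (k : Int) : Int :=
  ((PySem.List.enumerate arr 0).foldl
    (fun (st : Int × PySem.Dict Int Int × Int) jx =>
      let p := st.2.2 + jx.2
      let result := match st.2.1.get? (p - k) with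
        | some m => min st.1 (jx.1 + 1 - m)
        | none => st.1
      (result, st.2.1.insert p (jx.1 + 1), p))
    (2147483647, PySem.Dict.empty.insert 0 0, 0)).1

-- ===== PRECONDITION & SPEC =====
def Spec_smallestSubarraySumK (arr : List Int) (k : Int) (out : Int) : Prop := out = smallestSubarraySumK_alt arr k
instance (arr : List Int) (k : Int) (out : Int) : Decidable (Spec_smallestSubarraySumK arr k out) := by unfold Spec_smallestSubarraySumK; infer_instance

-- ===== CLAIM (what is proved, stated in full; the proofs are below) =====
def Claim_equal_smallestSubarraySumK : Prop := ∀ (arr : List Int) (k : Int), Dom_smallestSubarraySumK arr k → Spec_smallestSubarraySumK arr k (smallestSubarraySumK arr k)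

-- ===== LEMMAS AND PROOFS =====

-- prefix sum of the first m elements
def pvPref (arr : List Int) (m : Nat) : Int := (arr.take m).sum

-- most recent prefix index ≤ t whose prefix sum is v (abstract model of B's dict)
def pvLastIdx (arr : List Int) (v : Int) : Nat → Option Nat
  | 0 => if pvPref arr 0 = v then some 0 else none
  | t+1 => if pvPref arr (t+1) = v then some (t+1) else pvLastIdx arr v t

-- candidate lengths produced by A's row i starting at column b
def pvRowFrom (arr : List Int) (k : Int) (i b : Nat) : List Int :=
  (List.range' b (arr.length - b)).filterMap
    (fun j => if pvPref arr (j+1) - pvPref arr i = k then some ((j : Int) - (i : Int) + 1) else none)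

def pvLA (arr : List Int) (k : Int) : List Int :=
  (List.range arr.length).flatMap (fun i => pvRowFrom arr k i i)

def pvLB (arr : List Int) (k : Int) (t : Nat) : List Int :=
  (List.range t).filterMap
    (fun j => match pvLastIdx arr (pvPref arr (j+1) - k) j with
      | some m => some ((j : Int) + 1 - (m : Int))
      | none => none)

lemma pvPref_succ (arr : List Int) (b : Nat) (hb : b < arr.length) :
    pvPref arr (b+1) = pvPref arr b + arr[b] := by
  simp only [pvPref, List.take_add_one, List.sum_append, List.getElem?_eq_getElem hb,
    Option.toList_some, List.sum_cons, List.sum_nil, add_zero]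

-- min-fold toolkit
lemma pvFoldlMin_le_init (l : List Int) (c : Int) : l.foldl min c ≤ c := by
  induction l generalizing c with
  | nil => simp
  | cons x xs ih => exact le_trans (ih (min c x)) (min_le_left _ _)

lemma pvFoldlMin_le_mem {l : List Int} {x : Int} (hx : x ∈ l) (c : Int) : l.foldl min c ≤ x := by
  induction l generalizing c with
  | nil => cases hx
  | cons y ys ih =>
    rcases List.mem_cons.1 hx with rfl | h
    · rw [List.foldl_cons]; exact le_trans (pvFoldlMin_le_init _ _) (min_le_right _ _)
    · exact ih h _

lemma pvFoldlMin_cases (l : List Int) (c : Int) : l.foldl min c = c ∨ l.foldl min c ∈ l := by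
  induction l generalizing c with
  | nil => left; rfl
  | cons x xs ih =>
    rcases ih (min c x) with h | h
    · rw [List.foldl_cons, h]
      rcases le_total c x with hcx | hxc
      · left; exact min_eq_left hcx
      · right; simp [min_eq_right hxc]
    · right; exact List.mem_cons_of_mem _ h

lemma pvFoldlMin_eq {l₁ l₂ : List Int} (c : Int)
    (h₁ : ∀ x ∈ l₁, ∃ y ∈ l₂, y ≤ x) (h₂ : ∀ y ∈ l₂, ∃ x ∈ l₁, x ≤ y) :
    l₁.foldl min c = l₂.foldl min c := by
  apply le_antisymm
  · rcases pvFoldlMin_cases l₂ c with h | h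
    · rw [h]; exact pvFoldlMin_le_init _ _
    · obtain ⟨x, hx, hxy⟩ := h₂ _ h
      exact le_trans (pvFoldlMin_le_mem hx c) hxy
  · rcases pvFoldlMin_cases l₁ c with h | h
    · rw [h]; exact pvFoldlMin_le_init _ _
    · obtain ⟨y, hy, hyx⟩ := h₁ _ h
      exact le_trans (pvFoldlMin_le_mem hy c) hyx

-- pvLastIdx properties
lemma pvLastIdx_sound {arr : List Int} {v : Int} {t m : Nat}
    (h : pvLastIdx arr v t = some m) : m ≤ t ∧ pvPref arr m = v := by
  induction t with
  | zero => simp only [pvLastIdx] at h; split at h <;> simp_all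
  | succ t ih =>
    simp only [pvLastIdx] at h
    split at h
    · cases h; exact ⟨le_refl _, by assumption⟩
    · obtain ⟨h1, h2⟩ := ih h; exact ⟨Nat.le_succ_of_le h1, h2⟩

lemma pvLastIdx_complete {arr : List Int} {v : Int} {t i : Nat}
    (hit : i ≤ t) (hv : pvPref arr i = v) : ∃ m, pvLastIdx arr v t = some m ∧ i ≤ m := by
  induction t with
  | zero =>
    have : i = 0 := Nat.le_zero.1 hit
    subst this
    exact ⟨0, by simp [pvLastIdx, hv], le_refl _⟩
  | succ t ih =>
    by_cases hp : pvPref arr (t+1) = v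
    · exact ⟨t+1, by simp [pvLastIdx, hp], hit⟩
    · rcases Nat.eq_or_lt_of_le hit with heq | hlt
      · exact absurd (heq ▸ hv) hp
      · obtain ⟨m, hm, him⟩ := ih (by omega)
        exact ⟨m, by simp [pvLastIdx, hp, hm], him⟩

-- A's inner loop
lemma pvInnerA (arr : List Int) (k : Int) (i : Nat) :
    ∀ b r, i ≤ b → b ≤ arr.length →
    ((PySem.List.pyRange (b : Int) arr.length 1).foldl
      (fun (st : Int × Int) j =>
        (if st.2 + PySem.List.pyGetD arr j 0 = k then min st.1 (j - (i : Int) + 1) else st.1,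
          st.2 + PySem.List.pyGetD arr j 0))
      (r, pvPref arr b - pvPref arr i))
    = ((pvRowFrom arr k i b).foldl min r, pvPref arr arr.length - pvPref arr i) := by
  intro b r hib hbn
  generalize hd : arr.length - b = d
  induction d generalizing b r with
  | zero =>
    have hbe : b = arr.length := by omega
    subst hbe
    rw [PySem.List.pyRange_one_eq_nil (le_refl _)]
    simp [pvRowFrom]
  | succ d ih =>
    have hbl : b < arr.length := by omega
    rw [PySem.List.pyRange_one_cons (by exact_mod_cast hbl)]
    rw [List.foldl_cons]
    simp only [PySem.List.pyGetD_ofNat arr b 0 hbl]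
    rw [show pvPref arr b - pvPref arr i + arr[b] = pvPref arr (b+1) - pvPref arr i from by
      rw [pvPref_succ arr b hbl]; ring]
    have hih := ih (b+1) (if pvPref arr (b+1) - pvPref arr i = k then min r ((b : Int) - (i : Int) + 1) else r) (by omega) (by omega) (by omega)
    push_cast at hih
    rw [hih]
    have hrow : pvRowFrom arr k i b
        = (if pvPref arr (b+1) - pvPref arr i = k then [((b : Int) - (i : Int) + 1)] else [])
          ++ pvRowFrom arr k i (b+1) := by
      unfold pvRowFrom
      rw [show arr.length - b = d + 1 from hd, List.range'_succ,
          show arr.length - (b+1) = d by omega, List.filterMap_cons]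
      by_cases hc : pvPref arr (b+1) - pvPref arr i = k <;> simp [hc]
    rw [hrow, List.foldl_append]
    split <;> simp

-- outer fold over flattened rows
lemma pvFoldRows {α : Type} (row : α → List Int) (l : List α) (r : Int) :
    l.foldl (fun r i => (row i).foldl min r) r = (l.flatMap row).foldl min r := by
  induction l generalizing r with
  | nil => rfl
  | cons x xs ih => simp [List.flatMap_cons, List.foldl_append, ih]

-- A equals min over pvLA
lemma pvA_eq (arr : List Int) (k : Int) :
    smallestSubarraySumK arr k = (pvLA arr k).foldl min 2147483647 := by
  unfold smallestSubarraySumK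
  rw [PySem.List.pyRange_zero_nat, List.foldl_map]
  unfold pvLA
  rw [← pvFoldRows]
  apply PySem.List.foldl_congr_mem
  intro r i hi
  have hi' : i < arr.length := List.mem_range.1 hi
  show ((PySem.List.pyRange (i : Int) arr.length 1).foldl
      (fun (st : Int × Int) j =>
        (if st.2 + PySem.List.pyGetD arr j 0 = k then min st.1 (j - (i : Int) + 1) else st.1,
          st.2 + PySem.List.pyGetD arr j 0))
      (r, 0)).1 = (pvRowFrom arr k i i).foldl min r
  have h := pvInnerA arr k i i r le_rfl (le_of_lt hi')
  rw [sub_self] at h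
  rw [h]

-- B's loop invariant: running minimum, dict as pvLastIdx, running prefix sum
lemma pvB_inv (arr : List Int) (k : Int) :
    ∀ t, t ≤ arr.length →
    ∃ D : PySem.Dict Int Int,
      ((List.range t).foldl
        (fun (st : Int × PySem.Dict Int Int × Int) (j : Nat) =>
          (match st.2.1.get? (st.2.2 + PySem.List.pyGetD arr (j : Int) 0 - k) with
            | some m => min st.1 ((j : Int) + 1 - m)
            | none => st.1,
           st.2.1.insert (st.2.2 + PySem.List.pyGetD arr (j : Int) 0) ((j : Int) + 1),
           st.2.2 + PySem.List.pyGetD arr (j : Int) 0))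
        (2147483647, PySem.Dict.empty.insert 0 0, 0))
      = ((pvLB arr k t).foldl min 2147483647, D, pvPref arr t)
      ∧ (∀ v, D.get? v = (pvLastIdx arr v t).map (fun m => (m : Int))) := by
  intro t
  induction t with
  | zero =>
    intro _
    refine ⟨PySem.Dict.empty.insert 0 0, by simp [pvLB, pvPref], ?_⟩
    intro v
    rw [PySem.Dict.get?_insert]
    by_cases hv : v = 0 <;> simp [pvLastIdx, pvPref, hv, eq_comm]
  | succ t ih =>
    intro ht
    have htl : t < arr.length := by omega
    obtain ⟨D, hfold, hD⟩ := ih (by omega)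
    refine ⟨D.insert (pvPref arr (t+1)) ((t : Int) + 1), ?_, ?_⟩
    · rw [List.range_succ, List.foldl_append, hfold, List.foldl_cons, List.foldl_nil]
      rw [PySem.List.pyGetD_ofNat arr t 0 htl, ← pvPref_succ arr t htl, hD]
      have hLB : pvLB arr k (t+1)
          = pvLB arr k t
            ++ (match pvLastIdx arr (pvPref arr (t+1) - k) t with
                | some m => [((t : Int) + 1 - (m : Int))]
                | none => []) := by
        unfold pvLB
        rw [List.range_succ, List.filterMap_append]
        cases h' : pvLastIdx arr (pvPref arr (t+1) - k) t <;> simp [h']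
      rw [hLB, List.foldl_append]
      cases h : pvLastIdx arr (pvPref arr (t+1) - k) t with
      | none => simp
      | some m => simp
    · intro v
      rw [PySem.Dict.get?_insert]
      by_cases hv : v = pvPref arr (t+1)
      · simp [pvLastIdx, hv, Nat.cast_add]
      · rw [if_neg hv, hD v]
        have hstep : pvLastIdx arr v (t+1) = pvLastIdx arr v t := by
          simp only [pvLastIdx]
          rw [if_neg (fun h => hv h.symm)]
        rw [hstep]

-- B equals min over pvLB
lemma pvB_eq (arr : List Int) (k : Int) :
    smallestSubarraySumK_alt arr k = (pvLB arr k arr.length).foldl min 2147483647 := by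
  unfold smallestSubarraySumK_alt
  rw [PySem.List.enumerate_eq_map_pyRange arr 0]
  rw [show PySem.List.len arr = ((arr.length : Nat) : Int) from rfl]
  rw [PySem.List.pyRange_zero_nat, List.foldl_map, List.foldl_map]
  obtain ⟨D, hfold, _⟩ := pvB_inv arr k arr.length le_rfl
  show (((List.range arr.length).foldl
        (fun (st : Int × PySem.Dict Int Int × Int) (j : Nat) =>
          (match st.2.1.get? (st.2.2 + PySem.List.pyGetD arr (j : Int) 0 - k) with
            | some m => min st.1 ((j : Int) + 1 - m)
            | none => st.1,
           st.2.1.insert (st.2.2 + PySem.List.pyGetD arr (j : Int) 0) ((j : Int) + 1),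
           st.2.2 + PySem.List.pyGetD arr (j : Int) 0))
        (2147483647, PySem.Dict.empty.insert 0 0, 0))).1
      = (pvLB arr k arr.length).foldl min 2147483647
  rw [hfold]

lemma pv_main (arr : List Int) (k : Int) :
    smallestSubarraySumK arr k = smallestSubarraySumK_alt arr k := by
  rw [pvA_eq, pvB_eq]
  apply pvFoldlMin_eq
  · intro x hx
    simp only [pvLA, List.mem_flatMap, List.mem_range, pvRowFrom, List.mem_filterMap] at hx
    obtain ⟨i, hin, j, hj, hfx⟩ := hx
    rw [List.mem_range'_1] at hj
    obtain ⟨hij, hjlt⟩ := hj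
    have hjn : j < arr.length := by omega
    split at hfx
    · rename_i hcond
      cases hfx
      obtain ⟨m, hm, him⟩ :=
        pvLastIdx_complete (arr := arr) (v := pvPref arr (j+1) - k) (t := j) hij
          (by linarith)
      refine ⟨(j : Int) + 1 - (m : Int), ?_, by omega⟩
      simp only [pvLB, List.mem_filterMap, List.mem_range]
      exact ⟨j, hjn, by rw [hm]⟩
    · cases hfx
  · intro y hy
    simp only [pvLB, List.mem_filterMap, List.mem_range] at hy
    obtain ⟨t, htn, hmap⟩ := hy
    cases hm : pvLastIdx arr (pvPref arr (t+1) - k) t with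
    | none => rw [hm] at hmap; cases hmap
    | some m =>
    rw [hm] at hmap
    cases hmap
    obtain ⟨hmt, hpm⟩ := pvLastIdx_sound hm
    refine ⟨(t : Int) - (m : Int) + 1, ?_, by omega⟩
    simp only [pvLA, List.mem_flatMap, List.mem_range, pvRowFrom, List.mem_filterMap]
    refine ⟨m, by omega, t, ?_, ?_⟩
    · rw [List.mem_range'_1]
      constructor <;> omega
    · rw [if_pos (by linarith)]

-- ===== VERDICT (by name: the statement is the Claim_ definition above) =====
theorem smallestSubarraySumK_spec : Claim_equal_smallestSubarraySumK := by
  intro arr k _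
  unfold Spec_smallestSubarraySumK
  exact pv_main arr k
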